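-- pv_equiv track=rewrite | github.com/stuckyb/gcdl | src/api_core/data_request.py | _listAllowedGrains
-- ===== SOURCE A (Python) =====
-- NONE = 0
--
-- ANNUAL = 1
--
-- MONTHLY = 2
--
-- DAILY = 3
--
-- def _listAllowedGrains(grain, method):
--     """
--     Given a date grain and a grain method, returns a list
--     of other grains allowed by the method from coarser to finer
--     """
--     grains = []
--     if method == 'finer':
--         if grain == ANNUAL:
--             grains = [MONTHLY, DAILY]
--         if grain == MONTHLY:
--             grains = [DAILY]
--     elif method == 'coarser':
--         if grain == DAILY:
--             grains = [MONTHLY, ANNUAL]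
--         if grain == MONTHLY:
--             grains = [ANNUAL]
--     elif method == 'any' and grain != NONE:
--         grains = [g for g in [ANNUAL, MONTHLY, DAILY] if g != grain]
--
--     return grains
-- ===== SOURCE B (Python) =====
-- NONE = 0
-- ANNUAL = 1
-- MONTHLY = 2
-- DAILY = 3
--
-- def _listAllowedGrains(grain, method):
--     """Derive the allowed grains positionally from the coarse-to-fine ordering."""
--     order = [ANNUAL, MONTHLY, DAILY]
--     if method in ('finer', 'coarser') and grain in order:
--         i = order.index(grain)
--         return order[i + 1:] if method == 'finer' else order[:i][::-1]
--     if method == 'any' and grain != NONE: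
--         return [g for g in order if g != grain]
--     return []
-- ===== Notes on version B (the rewrite author's own statement) =====
-- stated objective: simpler
-- what changed: B derives the result positionally from one ordered list order=[ANNUAL,MONTHLY,DAILY] (suffix after the grain for 'finer', reversed prefix for 'coarser', filter for 'any') instead of A's per-grain case enumeration.
import Mathlib
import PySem

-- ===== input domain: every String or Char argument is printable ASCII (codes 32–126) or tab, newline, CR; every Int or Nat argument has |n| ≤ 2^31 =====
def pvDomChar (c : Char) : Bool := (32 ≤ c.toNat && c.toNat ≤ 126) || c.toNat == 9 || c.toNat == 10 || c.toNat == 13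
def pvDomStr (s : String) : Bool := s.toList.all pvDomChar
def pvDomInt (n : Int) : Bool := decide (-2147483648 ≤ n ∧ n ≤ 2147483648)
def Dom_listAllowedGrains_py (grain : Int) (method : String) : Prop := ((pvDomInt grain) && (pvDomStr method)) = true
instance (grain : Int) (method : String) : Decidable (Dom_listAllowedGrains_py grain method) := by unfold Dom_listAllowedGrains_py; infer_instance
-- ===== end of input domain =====

-- B derives the allowed grains positionally from the ordered list [ANNUAL, MONTHLY, DAILY] (suffix / reversed prefix / filter) instead of A's per-grain case enumeration; objective: simpler.


-- ===== PORT A =====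
def listAllowedGrains_py (grain : Int) (method : String) : List Int :=
  let grains : List Int := []
  if method == "finer" then
    let grains := if grain == 1 then ([2, 3] : List Int) else grains
    let grains := if grain == 2 then ([3] : List Int) else grains
    grains
  else if method == "coarser" then
    let grains := if grain == 3 then ([2, 1] : List Int) else grains
    let grains := if grain == 2 then ([1] : List Int) else grains
    grains
  else if method == "any" && grain != 0 then
    ([1, 2, 3] : List Int).filter (fun g => g != grain)
  else
    grains

-- ===== PORT B =====
-- order = [ANNUAL, MONTHLY, DAILY]
def lagOrder : List Int := [1, 2, 3]

def listAllowedGrains_py_alt (grain : Int) (method : String) : List Int :=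
  if (method == "finer" || method == "coarser") && lagOrder.contains grain then
    match lagOrder.idxOf? grain with
    | some i => if method == "finer" then lagOrder.drop (i + 1) else (lagOrder.take i).reverse
    | none => []
  else if method == "any" && grain != 0 then
    lagOrder.filter (fun g => g != grain)
  else
    []

-- ===== PRECONDITION & SPEC =====
def Spec_listAllowedGrains_py (grain : Int) (method : String) (out : List Int) : Prop := out = listAllowedGrains_py_alt grain method
instance (grain : Int) (method : String) (out : List Int) : Decidable (Spec_listAllowedGrains_py grain method out) := by unfold Spec_listAllowedGrains_py; infer_instance

-- ===== CLAIM (what is proved, stated in full; the proofs are below) =====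
def Claim_equal_listAllowedGrains_py : Prop := ∀ (grain : Int) (method : String), Dom_listAllowedGrains_py grain method → Spec_listAllowedGrains_py grain method (listAllowedGrains_py grain method)

-- ===== LEMMAS AND PROOFS =====

-- ===== VERDICT (by name: the statement is the Claim_ definition above) =====
theorem listAllowedGrains_py_spec : Claim_equal_listAllowedGrains_py := by
  intro grain method _
  unfold Spec_listAllowedGrains_py listAllowedGrains_py listAllowedGrains_py_alt lagOrder
  by_cases h1 : grain = 1 <;> by_cases h2 : grain = 2 <;> by_cases h3 : grain = 3 <;>
    by_cases hf : method = "finer" <;> by_cases hc : method = "coarser" <;>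
    by_cases ha : method = "any" <;>
    simp_all [List.idxOf?, List.findIdx?] <;> decide
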